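-- pv_equiv track=rewrite | github.com/TylerBernardo/Google-FooBar | Challenge 2/part1.py | solution
-- ===== SOURCE A (Python) =====
-- def solution(l, t):
--     # Your code here
--     #Use for loop to start at each index
--     #From each index, start adding until you go over.
--     #If a sequence adds up to t, note the start and end indexes and return those, otherwise return [-1.-1]
--     for index in range(len(l)):
--         total = 0
--         add = 0
--         while total < t and (index + add) <= len(l)  -1:
--             total += l[index + add]
--             if total == t:
--                 return [index, index + add]
--             add = add + 1
--     return [-1,-1]
-- ===== SOURCE B (Python) =====
-- def solution(l, t):
--     # A non-positive target can never be hit: the scan compares the running sum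
--     # with t before any element is added, so no window ever qualifies.
--     if t <= 0:
--         return [-1, -1]
--     n = len(l)
--     # prefix sums: P[k] = sum of the first k elements
--     P = [0]
--     for x in l:
--         P.append(P[-1] + x)
--     # suffix maxima of the prefix sums: M[k] = max(P[k+1..n]);
--     # lets us skip in O(1) every start whose running sum never reaches t
--     M = [0] * n
--     m = P[n]
--     for k in range(n - 1, -1, -1):
--         m = max(m, P[k + 1])
--         M[k] = m
--     for i in range(n):
--         need = t + P[i]
--         if M[i] < need:
--             continue  # running sums from i never reach t: no first crossing
--         for j in range(i, n):
--             if P[j + 1] >= need: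
--                 if P[j + 1] == need:
--                     return [i, j]
--                 break  # first crossing overshoots t: this start fails
--     return [-1, -1]
-- ===== Notes on version B (the rewrite author's own statement) =====
-- stated objective: alternative
-- what changed: B precomputes the prefix-sum array once and a suffix-maxima array over it, then for each start compares precomputed prefix sums against a fixed threshold and skips in O(1) any start whose running sums can never reach t, instead of A's per-start re-accumulation inner loop.
import Mathlib
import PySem

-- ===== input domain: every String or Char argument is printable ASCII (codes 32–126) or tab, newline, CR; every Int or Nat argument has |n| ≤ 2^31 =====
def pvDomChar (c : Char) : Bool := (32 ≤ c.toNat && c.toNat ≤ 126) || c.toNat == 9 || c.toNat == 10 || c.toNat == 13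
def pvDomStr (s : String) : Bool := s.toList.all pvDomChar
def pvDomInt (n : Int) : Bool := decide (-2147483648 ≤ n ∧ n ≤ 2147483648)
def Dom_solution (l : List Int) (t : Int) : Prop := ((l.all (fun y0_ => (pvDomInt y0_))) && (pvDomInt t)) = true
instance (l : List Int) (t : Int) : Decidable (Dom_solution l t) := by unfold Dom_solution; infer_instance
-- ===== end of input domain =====

-- B replaces A's per-start re-accumulation by one precomputed prefix-sum array plus a
-- suffix-maxima array that skips hopeless starts in O(1) (objective: alternative).

-- ===== PORT A =====
-- inner `while total < t and (index+add) <= len(l)-1` loop; fuel bounds the iterations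
def innerA (l : List Int) (t : Int) (index : Nat) : Nat → Int → Nat → Option (List Int)
  | 0, _, _ => none
  | fuel + 1, total, add =>
    if total < t ∧ (index + add : Int) ≤ (l.length : Int) - 1 then
      let total' := total + l.getD (index + add) 0   -- l[index+add], in range by the guard
      if total' = t then some [(index : Int), ((index + add : Nat) : Int)]
      else innerA l t index fuel total' (add + 1)
    else none

-- outer `for index in range(len(l))` loop
def outerA (l : List Int) (t : Int) : Nat → Nat → List Int
  | 0, _ => [-1, -1]
  | fuel + 1, index =>
    match innerA l t index l.length 0 0 with
    | some r => r
    | none => outerA l t fuel (index + 1)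

def solution (l : List Int) (t : Int) : List Int := outerA l t l.length 0

-- ===== PORT B =====
-- `for x in l: P.append(P[-1] + x)`, with P[-1] carried as `last`
def buildPgo : List Int → Int → List Int
  | [], _ => []
  | x :: xs, last => (last + x) :: buildPgo xs (last + x)

def buildP (l : List Int) : List Int := 0 :: buildPgo l 0

-- `for k in range(n-1, -1, -1): m = max(m, P[k+1]); M[k] = m`, filling M back to front
def buildM (P : List Int) : Nat → Int → List Int → List Int
  | 0, _, acc => acc
  | k + 1, m, acc =>
    let m' := max m (P.getD (k + 1) 0)
    buildM P k m' (m' :: acc)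

-- `for j in range(i, n)` inner scan over the precomputed prefix sums
def innerB (P : List Int) (n : Nat) (need : Int) (i : Nat) : Nat → Nat → Option (List Int)
  | 0, _ => none
  | fuel + 1, j =>
    if j < n then
      if need ≤ P.getD (j + 1) 0 then
        if P.getD (j + 1) 0 = need then some [(i : Int), (j : Int)]
        else none   -- first crossing overshoots: break
      else innerB P n need i fuel (j + 1)
    else none

-- `for i in range(n)` outer loop with the O(1) suffix-maxima skip
def outerB (l : List Int) (t : Int) (P M : List Int) : Nat → Nat → List Int
  | 0, _ => [-1, -1]
  | fuel + 1, i =>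
    let need := t + P.getD i 0
    if M.getD i 0 < need then outerB l t P M fuel (i + 1)   -- continue: sums from i never reach t
    else
      match innerB P l.length need i l.length i with
      | some r => r
      | none => outerB l t P M fuel (i + 1)

def solution_alt (l : List Int) (t : Int) : List Int :=
  if t ≤ 0 then [-1, -1]
  else
    let n := l.length
    let P := buildP l
    let M := buildM P n (P.getD n 0) []
    outerB l t P M n 0

-- ===== PRECONDITION & SPEC =====
def Spec_solution (l : List Int) (t : Int) (out : List Int) : Prop := out = solution_alt l t
instance (l : List Int) (t : Int) (out : List Int) : Decidable (Spec_solution l t out) := by unfold Spec_solution; infer_instance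

-- ===== CLAIM (what is proved, stated in full; the proofs are below) =====
def Claim_equal_solution : Prop := ∀ (l : List Int) (t : Int), Dom_solution l t → Spec_solution l t (solution l t)

-- ===== LEMMAS AND PROOFS =====

-- prefix sums: abbreviation used by the proofs
def pref (l : List Int) (k : Nat) : Int := ((l.take k).sum : Int)

theorem pref_succ (l : List Int) (j : Nat) (hj : j < l.length) :
    pref l (j + 1) = pref l j + l.getD j 0 := by
  unfold pref
  rw [List.sum_take_succ l j hj]
  congr 1
  simp [List.getD_eq_getElem?_getD, List.getElem?_eq_getElem hj]

theorem buildPgo_getD (l : List Int) (a : Int) (k : Nat) (hk : k < l.length) :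
    (buildPgo l a).getD k 0 = a + pref l (k + 1) := by
  induction l generalizing a k with
  | nil => simp at hk
  | cons x xs ih =>
    cases k with
    | zero => simp [buildPgo, pref]
    | succ k =>
      simp only [buildPgo, List.getD_cons_succ]
      rw [ih (a + x) k (by simpa using hk)]
      simp [pref, List.take_succ_cons]
      ring

theorem buildP_getD (l : List Int) (k : Nat) (hk : k ≤ l.length) :
    (buildP l).getD k 0 = pref l k := by
  cases k with
  | zero => simp [buildP, pref]
  | succ k =>
    simp only [buildP, List.getD_cons_succ]
    rw [buildPgo_getD l 0 k (by omega)]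
    simp

-- buildM is a pure prepend of its own output to acc
theorem buildM_append (P : List Int) (k : Nat) (m : Int) (acc : List Int) :
    buildM P k m acc = buildM P k m [] ++ acc := by
  induction k generalizing m acc with
  | zero => simp [buildM]
  | succ k ih =>
    simp only [buildM]
    rw [ih, ih (max m (P.getD (k + 1) 0)) [_]]
    simp

theorem buildM_length (P : List Int) (k : Nat) (m : Int) :
    (buildM P k m []).length = k := by
  induction k generalizing m with
  | zero => simp [buildM]
  | succ k ih =>
    simp only [buildM]
    rw [buildM_append]
    simp [ih]

-- unfolding step of buildM as an append
theorem buildM_succ (P : List Int) (k : Nat) (m : Int) :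
    buildM P (k + 1) m [] =
      buildM P k (max m (P.getD (k + 1) 0)) [] ++ [max m (P.getD (k + 1) 0)] := by
  conv_lhs => rw [buildM]
  exact buildM_append P k _ _

-- the seed bounds every produced entry from below
theorem buildM_seed_le (P : List Int) (k : Nat) (m : Int) (i : Nat) (hi : i < k) :
    m ≤ (buildM P k m []).getD i 0 := by
  induction k generalizing m with
  | zero => omega
  | succ k ih =>
    rw [buildM_succ]
    by_cases hik : i < k
    · rw [List.getD_append _ _ _ i (by rw [buildM_length]; exact hik)]
      exact le_trans (le_max_left _ _) (ih _ hik)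
    · have hik' : i = k := by omega
      subst hik'
      rw [List.getD_append_right _ _ _ i (by rw [buildM_length])]
      simp [buildM_length]

-- M[i] dominates every later prefix sum P[j+1]
theorem buildM_ge (P : List Int) (k : Nat) (m : Int) (i j : Nat)
    (hij : i ≤ j) (hjk : j < k) :
    P.getD (j + 1) 0 ≤ (buildM P k m []).getD i 0 := by
  induction k generalizing m with
  | zero => omega
  | succ k ih =>
    rw [buildM_succ]
    by_cases hjk' : j < k
    · have hik : i < k := by omega
      rw [List.getD_append _ _ _ i (by rw [buildM_length]; exact hik)]
      exact ih _ hjk'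
    · have hj : j = k := by omega
      subst hj
      by_cases hik : i < j
      · rw [List.getD_append _ _ _ i (by rw [buildM_length]; exact hik)]
        exact le_trans (le_max_right _ _) (buildM_seed_le P j _ i hik)
      · have hik' : i = j := by omega
        subst hik'
        rw [List.getD_append_right _ _ _ i (by rw [buildM_length])]
        simp [buildM_length]

-- A's inner loop returns none as soon as total ≥ t
theorem innerA_none (l : List Int) (t : Int) (index : Nat) (f : Nat) (total : Int) (add : Nat)
    (h : ¬ total < t) : innerA l t index f total add = none := by
  cases f with
  | zero => rfl
  | succ f => simp [innerA, h]

-- the heart: A's inner loop ≡ B's inner scan over the prefix sums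
theorem innerAB (f : Nat) (l : List Int) (t : Int) (i add : Nat) (total : Int)
    (htot : total = pref l (i + add) - pref l i) (hlt : total < t)
    (hf : l.length ≤ i + add + f) :
    innerA l t i f total add = innerB (buildP l) l.length (t + pref l i) i f (i + add) := by
  induction f generalizing add total with
  | zero => rfl
  | succ f ih =>
    by_cases hb : i + add < l.length
    · have hbA : total < t ∧ (i : Int) + (add : Int) ≤ (l.length : Int) - 1 :=
        ⟨hlt, by omega⟩
      have hP : (buildP l).getD (i + add + 1) 0 = pref l (i + add) + l.getD (i + add) 0 := by
        rw [buildP_getD l _ (by omega)]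
        exact pref_succ l _ hb
      simp only [innerA, innerB]
      rw [if_pos hbA, if_pos hb]
      by_cases heq : total + l.getD (i + add) 0 = t
      · rw [if_pos heq, if_pos (by omega), if_pos (by omega)]
      · rw [if_neg heq]
        by_cases hge : t + pref l i ≤ (buildP l).getD (i + add + 1) 0
        · rw [if_pos hge, if_neg (by omega)]
          exact innerA_none l t i f _ _ (by omega)
        · rw [if_neg hge]
          have hrec := ih (add + 1) (total + l.getD (i + add) 0)
            (by rw [show i + (add + 1) = i + add + 1 by omega, pref_succ l _ hb]; omega)
            (by omega) (by omega)
          rw [show i + (add + 1) = i + add + 1 by omega] at hrec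
          exact hrec
    · have h1 : ¬ (total < t ∧ (i : Int) + (add : Int) ≤ (l.length : Int) - 1) := by
        rintro ⟨_, h2⟩
        omega
      simp only [innerA, innerB]
      rw [if_neg h1, if_neg hb]

-- B's inner scan finds nothing when every later prefix sum is below the threshold
theorem innerB_none (P : List Int) (n : Nat) (need : Int) (i : Nat) (f j : Nat)
    (h : ∀ k, j ≤ k → k < n → P.getD (k + 1) 0 < need) :
    innerB P n need i f j = none := by
  induction f generalizing j with
  | zero => rfl
  | succ f ih =>
    simp only [innerB]
    by_cases hj : j < n
    · rw [if_pos hj, if_neg (by have := h j le_rfl hj; omega)]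
      exact ih (j + 1) (fun k hk1 hk2 => h k (by omega) hk2)
    · rw [if_neg hj]

-- for non-positive targets A's scan never starts
theorem outerA_nonpos (l : List Int) (t : Int) (ht : t ≤ 0) (f i : Nat) :
    outerA l t f i = [-1, -1] := by
  induction f generalizing i with
  | zero => rfl
  | succ f ih =>
    simp only [outerA]
    rw [innerA_none l t i l.length 0 0 (by omega)]
    exact ih (i + 1)

-- the two outer loops agree step by step (t > 0)
theorem outer_eq (l : List Int) (t : Int) (ht : 0 < t) (f i : Nat)
    (hfi : i + f ≤ l.length) :
    outerA l t f i =
      outerB l t (buildP l) (buildM (buildP l) l.length ((buildP l).getD l.length 0) []) f i := by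
  induction f generalizing i with
  | zero => rfl
  | succ f ih =>
    have hi : i < l.length := by omega
    have hprefi : (buildP l).getD i 0 = pref l i := buildP_getD l i (by omega)
    have hA : innerA l t i l.length 0 0 =
        innerB (buildP l) l.length (t + pref l i) i l.length i := by
      have := innerAB l.length l t i 0 0 (by simp [pref]) ht (by omega)
      simpa using this
    simp only [outerA, outerB]
    by_cases hskip :
        (buildM (buildP l) l.length ((buildP l).getD l.length 0) []).getD i 0 <
          t + (buildP l).getD i 0
    · rw [if_pos hskip]
      have hnone : innerA l t i l.length 0 0 = none := by
        rw [hA]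
        apply innerB_none
        intro k hk1 hk2
        have hle := buildM_ge (buildP l) l.length ((buildP l).getD l.length 0) i k hk1 hk2
        rw [hprefi] at hskip
        omega
      rw [hnone]
      exact ih (i + 1) (by omega)
    · rw [if_neg hskip, hA, hprefi]
      cases hmatch : innerB (buildP l) l.length (t + pref l i) i l.length i with
      | some r => rfl
      | none => exact ih (i + 1) (by omega)

-- ===== VERDICT (by name: the statement is the Claim_ definition above) =====
theorem solution_spec : Claim_equal_solution := by
  intro l t _
  unfold Spec_solution solution solution_alt
  by_cases ht : t ≤ 0
  · rw [if_pos ht]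
    exact outerA_nonpos l t ht l.length 0
  · rw [if_neg ht]
    exact outer_eq l t (by omega) l.length 0 (by omega)
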